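-- pv_equiv track=rewrite | github.com/mithun-27/leet_code | Find Sum of Array Product of Magical Sequences.py | magicalSum
-- ===== SOURCE A (Python) =====
-- from functools import lru_cache
-- import math
-- from typing import List
--
-- MOD = 10**9 + 7
--
-- def magicalSum(total_count: int, target_odd: int, numbers: List[int]) -> int:
--
--     @lru_cache(None)
--     def dfs(remaining, odd_needed, index, carry):
--         if remaining < 0 or odd_needed < 0 or remaining + carry.bit_count() < odd_needed:
--             return 0
--         if remaining == 0:
--             return 1 if odd_needed == carry.bit_count() else 0
--         if index >= len(numbers):
--             return 0
--
--         ans = 0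
--         for take in range(remaining + 1):
--             ways = math.comb(remaining, take) * pow(numbers[index], take, MOD) % MOD
--             new_carry = carry + take
--             ans += ways * dfs(remaining - take, odd_needed - (new_carry % 2), index + 1, new_carry // 2)
--             ans %= MOD
--         return ans
--
--     return dfs(total_count, target_odd, 0, 0)
-- ===== SOURCE B (Python) =====
-- import math
--
-- MOD = 10**9 + 7
--
-- def magicalSum(total_count: int, target_odd: int, numbers) -> int:
--     # Bottom-up forward DP over live states (remaining, odd_needed, carry),
--     # resolving finished states (remaining == 0) into the answer immediately.
--     def put(states, rem, odd, carry, w):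
--         # settle a state reached with weight w: dead -> 0, finished -> its
--         # terminal weight, otherwise merge it into the live-state table.
--         if rem < 0 or odd < 0 or rem + carry.bit_count() < odd:
--             return 0
--         if rem == 0:
--             return w if odd == carry.bit_count() else 0
--         key = (rem, odd, carry)
--         states[key] = (states.get(key, 0) + w) % MOD
--         return 0
--
--     states = {}
--     ans = put(states, total_count, target_odd, 0, 1)
--     for x in numbers:
--         nxt = {}
--         for (rem, odd, carry), cnt in states.items():
--             for take in range(rem + 1):
--                 w = cnt * math.comb(rem, take) % MOD * pow(x, take, MOD) % MOD
--                 nc = carry + take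
--                 ans = (ans + put(nxt, rem - take, odd - nc % 2, nc // 2, w)) % MOD
--         states = nxt
--     return ans % MOD
-- ===== Notes on version B (the rewrite author's own statement) =====
-- stated objective: alternative
-- what changed: Replaces the memoized top-down recursion (lru_cache dfs over (remaining, odd_needed, index, carry)) with an explicit bottom-up forward DP: a dictionary of live states (remaining, odd_needed, carry) is pushed through the numbers one index at a time, dead states are dropped and finished states (remaining==0) are resolved into the running answer immediately.
import Mathlib
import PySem

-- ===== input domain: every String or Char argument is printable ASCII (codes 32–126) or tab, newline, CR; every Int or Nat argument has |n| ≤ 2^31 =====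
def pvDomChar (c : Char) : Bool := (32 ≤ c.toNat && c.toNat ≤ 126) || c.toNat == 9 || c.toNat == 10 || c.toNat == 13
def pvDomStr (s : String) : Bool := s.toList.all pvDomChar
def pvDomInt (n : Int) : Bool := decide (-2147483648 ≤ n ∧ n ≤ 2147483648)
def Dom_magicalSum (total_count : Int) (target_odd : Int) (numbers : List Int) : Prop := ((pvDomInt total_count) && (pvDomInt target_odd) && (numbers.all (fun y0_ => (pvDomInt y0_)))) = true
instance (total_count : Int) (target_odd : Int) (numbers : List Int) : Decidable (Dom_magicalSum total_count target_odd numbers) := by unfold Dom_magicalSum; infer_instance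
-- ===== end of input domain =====

-- B replaces A's memoized top-down recursion by a bottom-up forward DP over a
-- dictionary of live states, resolving finished states into a running answer
-- (objective: alternative decomposition; same results, comparable cost).

def pyMOD : Int := 1000000007

-- ===== PORT A =====
-- A's dfs(remaining, odd_needed, index, carry): the index into `numbers` is
-- ported as structural recursion on the remaining suffix numbers[index:].
def dfsA (remaining odd_needed : Int) (suffix : List Int) (carry : Int) : Int :=
  if remaining < 0 ∨ odd_needed < 0 ∨ remaining + (PySem.Int.bitCount carry : Int) < odd_needed then 0
  else if remaining = 0 then (if odd_needed = (PySem.Int.bitCount carry : Int) then 1 else 0)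
  else
    match suffix with
    | [] => 0
    | x :: rest =>
      (PySem.List.pyRange 0 (remaining + 1)).foldl (fun ans take =>
        let ways := PySem.Int.mod ((Nat.choose remaining.toNat take.toNat : Int) * PySem.Int.powMod x take.toNat pyMOD) pyMOD
        let new_carry := carry + take
        PySem.Int.mod (ans + ways * dfsA (remaining - take) (odd_needed - PySem.Int.mod new_carry 2) rest (PySem.Int.floordiv new_carry 2)) pyMOD) 0
termination_by suffix.length
decreasing_by simp

def magicalSum (total_count : Int) (target_odd : Int) (numbers : List Int) : Int :=
  dfsA total_count target_odd numbers 0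

-- ===== PORT B =====
-- Source B's helper `put`: settle a state reached with weight w (dead → 0,
-- finished → its terminal weight, otherwise merged into the live table).
def putB (states : PySem.Dict (Int × Int × Int) Int) (rem odd carry w : Int) :
    PySem.Dict (Int × Int × Int) Int × Int :=
  if rem < 0 ∨ odd < 0 ∨ rem + (PySem.Int.bitCount carry : Int) < odd then (states, 0)
  else if rem = 0 then (states, if odd = (PySem.Int.bitCount carry : Int) then w else 0)
  else (states.insert (rem, odd, carry) (PySem.Int.mod (states.getD (rem, odd, carry) 0 + w) pyMOD), 0)

-- body of Source B's innermost `for take in range(rem + 1)` loop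
def innerStep (x rem odd carry cnt : Int)
    (st : PySem.Dict (Int × Int × Int) Int × Int) (take : Int) :
    PySem.Dict (Int × Int × Int) Int × Int :=
  let w := PySem.Int.mod (PySem.Int.mod (cnt * (Nat.choose rem.toNat take.toNat : Int)) pyMOD * PySem.Int.powMod x take.toNat pyMOD) pyMOD
  let nc := carry + take
  let r := putB st.1 (rem - take) (odd - PySem.Int.mod nc 2) (PySem.Int.floordiv nc 2) w
  (r.1, PySem.Int.mod (st.2 + r.2) pyMOD)

-- body of Source B's `for (rem, odd, carry), cnt in states.items()` loop
def midStep (x : Int) (st : PySem.Dict (Int × Int × Int) Int × Int)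
    (kv : (Int × Int × Int) × Int) : PySem.Dict (Int × Int × Int) Int × Int :=
  (PySem.List.pyRange 0 (kv.1.1 + 1)).foldl (innerStep x kv.1.1 kv.1.2.1 kv.1.2.2 kv.2) st

-- body of Source B's `for x in numbers` loop (fresh `nxt` table, same running answer)
def outerStep (st : PySem.Dict (Int × Int × Int) Int × Int) (x : Int) :
    PySem.Dict (Int × Int × Int) Int × Int :=
  st.1.items.foldl (midStep x) (PySem.Dict.empty, st.2)

def magicalSum_alt (total_count : Int) (target_odd : Int) (numbers : List Int) : Int :=
  let init := putB PySem.Dict.empty total_count target_odd 0 1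
  let fin := numbers.foldl outerStep init
  PySem.Int.mod fin.2 pyMOD

-- ===== PRECONDITION & SPEC =====
def Spec_magicalSum (total_count : Int) (target_odd : Int) (numbers : List Int) (out : Int) : Prop := out = magicalSum_alt total_count target_odd numbers
instance (total_count : Int) (target_odd : Int) (numbers : List Int) (out : Int) : Decidable (Spec_magicalSum total_count target_odd numbers out) := by unfold Spec_magicalSum; infer_instance

-- ===== CLAIM (what is proved, stated in full; the proofs are below) =====
def Claim_equal_magicalSum : Prop := ∀ (total_count : Int) (target_odd : Int) (numbers : List Int), Dom_magicalSum total_count target_odd numbers → Spec_magicalSum total_count target_odd numbers (magicalSum total_count target_odd numbers)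

-- ===== LEMMAS AND PROOFS =====

-- states that Source B ever stores in the live table
def Viable (k : Int × Int × Int) : Prop :=
  0 < k.1 ∧ 0 ≤ k.2.1 ∧ k.2.1 ≤ k.1 + (PySem.Int.bitCount k.2.2 : Int)

def DictOK (d : PySem.Dict (Int × Int × Int) Int) : Prop :=
  d.keys.Nodup ∧ ∀ p ∈ d.items, Viable p.1

-- weighted total of A's dfs over the live table, against suffix s
def SD (d : PySem.Dict (Int × Int × Int) Int) (s : List Int) : Int :=
  (d.items.map (fun p => p.2 * dfsA p.1.1 p.1.2.1 s p.1.2.2)).sum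

lemma pyMOD_pos : (0 : Int) < pyMOD := by norm_num [pyMOD]

lemma mod_modeq (a : Int) : PySem.Int.mod a pyMOD ≡ a [ZMOD pyMOD] := by
  rw [PySem.Int.mod_eq_emod_of_pos pyMOD_pos]
  exact Int.emod_emod_of_dvd a dvd_rfl

lemma dfsA_neg {r o c : Int} (s : List Int)
    (h : r < 0 ∨ o < 0 ∨ r + (PySem.Int.bitCount c : Int) < o) : dfsA r o s c = 0 := by
  rw [dfsA.eq_def, if_pos h]

lemma dfsA_zero (o : Int) (s : List Int) (c : Int) :
    dfsA 0 o s c = if o = (PySem.Int.bitCount c : Int) then 1 else 0 := by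
  by_cases h1 : (0 : Int) < 0 ∨ o < 0 ∨ (0 : Int) + (PySem.Int.bitCount c : Int) < o
  · rw [dfsA_neg s h1, if_neg (by omega)]
  · rw [dfsA.eq_def, if_neg h1, if_pos rfl]

lemma dfsA_nil {r o c : Int}
    (h : ¬ (r < 0 ∨ o < 0 ∨ r + (PySem.Int.bitCount c : Int) < o)) (h0 : r ≠ 0) :
    dfsA r o [] c = 0 := by
  rw [dfsA.eq_def, if_neg h, if_neg h0]

lemma dfsA_cons {r o c x : Int} (rest : List Int)
    (h : ¬ (r < 0 ∨ o < 0 ∨ r + (PySem.Int.bitCount c : Int) < o)) (h0 : r ≠ 0) :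
    dfsA r o (x :: rest) c
      = (PySem.List.pyRange 0 (r + 1)).foldl (fun ans take =>
          PySem.Int.mod (ans + PySem.Int.mod ((Nat.choose r.toNat take.toNat : Int) * PySem.Int.powMod x take.toNat pyMOD) pyMOD
            * dfsA (r - take) (o - PySem.Int.mod (c + take) 2) rest (PySem.Int.floordiv (c + take) 2)) pyMOD) 0 := by
  rw [dfsA.eq_def, if_neg h, if_neg h0]

lemma foldl_mod_bounds (g h : Int → Int → Int)
    (hg : ∀ a t, g a t = PySem.Int.mod (h a t) pyMOD) :
    ∀ (L : List Int) (a : Int), L ≠ [] →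
      0 ≤ L.foldl g a ∧ L.foldl g a < pyMOD := by
  intro L
  induction L with
  | nil => intro a h; exact absurd rfl h
  | cons t rest ih =>
    intro a _
    by_cases hr : rest = []
    · subst hr
      simp only [List.foldl_cons, List.foldl_nil, hg]
      exact ⟨PySem.Int.mod_nonneg _ pyMOD_pos, PySem.Int.mod_lt _ pyMOD_pos⟩
    · simpa using ih (g a t) hr

lemma pyRange_ne_nil {r : Int} (h : 0 < r) : PySem.List.pyRange 0 (r + 1) ≠ [] := by
  intro hnil
  have hlen := congrArg List.length hnil
  rw [PySem.List.length_pyRange_one] at hlen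
  simp at hlen
  omega

lemma dfsA_bounds (r o : Int) (s : List Int) (c : Int) :
    0 ≤ dfsA r o s c ∧ dfsA r o s c < pyMOD := by
  by_cases h1 : r < 0 ∨ o < 0 ∨ r + (PySem.Int.bitCount c : Int) < o
  · rw [dfsA_neg s h1]
    exact ⟨le_refl 0, pyMOD_pos⟩
  by_cases h2 : r = 0
  · subst h2
    rw [dfsA_zero]
    split_ifs
    · exact ⟨by norm_num, by norm_num [pyMOD]⟩
    · exact ⟨le_refl 0, pyMOD_pos⟩
  rcases s with _ | ⟨x, rest⟩
  · rw [dfsA_nil h1 h2]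
    exact ⟨le_refl 0, pyMOD_pos⟩
  · rw [dfsA_cons rest h1 h2]
    exact foldl_mod_bounds _
      (fun ans take =>
        ans + PySem.Int.mod ((Nat.choose r.toNat take.toNat : Int) * PySem.Int.powMod x take.toNat pyMOD) pyMOD
          * dfsA (r - take) (o - PySem.Int.mod (c + take) 2) rest (PySem.Int.floordiv (c + take) 2))
      (fun a t => rfl) _ 0 (pyRange_ne_nil (by omega))

lemma foldl_mod_modeq (g : Int → Int → Int) (h : Int → Int)
    (hg : ∀ a t, g a t = PySem.Int.mod (a + h t) pyMOD) :
    ∀ (L : List Int) (a : Int), L.foldl g a ≡ a + (L.map h).sum [ZMOD pyMOD] := by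
  intro L
  induction L with
  | nil => intro a; simp
  | cons t rest ih =>
    intro a
    simp only [List.foldl_cons, List.map_cons, List.sum_cons]
    have h1 := ih (g a t)
    have h2 : g a t + (rest.map h).sum ≡ (a + h t) + (rest.map h).sum [ZMOD pyMOD] :=
      Int.ModEq.add_right _ (by rw [hg]; exact mod_modeq _)
    have h3 := h1.trans h2
    have e : (a + h t) + (rest.map h).sum = a + (h t + (rest.map h).sum) := by ring
    rwa [e] at h3

lemma sum_modeq {α : Type} (f g : α → Int) (L : List α)
    (h : ∀ t ∈ L, f t ≡ g t [ZMOD pyMOD]) :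
    (L.map f).sum ≡ (L.map g).sum [ZMOD pyMOD] := by
  induction L with
  | nil => simp
  | cons t rest ih =>
    simp only [List.map_cons, List.sum_cons]
    exact Int.ModEq.add (h t List.mem_cons_self) (ih fun t ht => h t (List.mem_cons_of_mem _ ht))

lemma sum_map_replace (f : Int × Int × Int → Int) :
    ∀ (l : List ((Int × Int × Int) × Int)), (l.map (fun p => p.1)).Nodup →
      ∀ {k : Int × Int × Int} {w : Int}, (k, w) ∈ l → ∀ (v : Int),
      ((l.map (fun p => if (p.1 == k) = true then (k, v) else p)).map (fun p => p.2 * f p.1)).sum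
        = (l.map (fun p => p.2 * f p.1)).sum - w * f k + v * f k := by
  intro l
  induction l with
  | nil => intro _ k w hmem; cases hmem
  | cons p rest ih =>
    intro hnd k w hmem v
    have hnd' : (rest.map (fun p => p.1)).Nodup := (List.nodup_cons.mp (by simpa using hnd)).2
    have hnot : p.1 ∉ rest.map (fun p => p.1) := (List.nodup_cons.mp (by simpa using hnd)).1
    by_cases hp : (p.1 == k) = true
    · have hpk : p.1 = k := by simpa using hp
      have hpe : p = (k, w) := by
        rcases List.mem_cons.mp hmem with h | h
        · exact h.symm
        · exact absurd (hpk ▸ List.mem_map_of_mem h) hnot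
      have hrest : rest.map (fun p => if (p.1 == k) = true then (k, v) else p) = rest := by
        have hcg : ∀ q ∈ rest, (fun p => if (p.1 == k) = true then (k, v) else p) q = id q := by
          intro q hq
          have hqk : q.1 ≠ k := fun h => hnot (hpk ▸ h ▸ List.mem_map_of_mem hq)
          simp [hqk]
        rw [List.map_congr_left hcg, List.map_id]
      simp only [List.map_cons, List.sum_cons, if_pos hp, hrest]
      rw [hpe]
      ring
    · have hpk : p.1 ≠ k := by simpa using hp
      have hmem' : (k, w) ∈ rest := by
        rcases List.mem_cons.mp hmem with h | h
        · exact absurd (congrArg Prod.fst h.symm) hpk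
        · exact h
      simp only [List.map_cons, List.sum_cons, if_neg hp]
      rw [ih hnd' hmem' v]
      ring

lemma keys_eq_map_fst (d : PySem.Dict (Int × Int × Int) Int) :
    d.keys = d.items.map (fun p => p.1) := rfl

lemma SD_insert (d : PySem.Dict (Int × Int × Int) Int) (hnd : d.keys.Nodup)
    (k : Int × Int × Int) (w : Int) (s : List Int) :
    SD (d.insert k (PySem.Int.mod (d.getD k 0 + w) pyMOD)) s
      ≡ SD d s + w * dfsA k.1 k.2.1 s k.2.2 [ZMOD pyMOD] := by
  unfold SD
  set f : Int × Int × Int → Int := fun q => dfsA q.1 q.2.1 s q.2.2 with hf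
  rw [keys_eq_map_fst] at hnd
  by_cases hc : d.contains k = true
  · obtain ⟨v, hv⟩ : ∃ v, d.get? k = some v := by
      have h := PySem.Dict.contains_eq_isSome_get? d k
      rw [hc] at h
      exact Option.isSome_iff_exists.mp h.symm
    have hmem := PySem.Dict.mem_items_of_get?_eq_some d hv
    have hgd : d.getD k 0 = v := PySem.Dict.getD_of_get?_eq_some d 0 hv
    rw [PySem.Dict.items_insert_of_contains d _ hc,
        sum_map_replace f d.items hnd hmem _]
    have h1 : PySem.Int.mod (d.getD k 0 + w) pyMOD * f k ≡ (v + w) * f k [ZMOD pyMOD] :=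
      Int.ModEq.mul_right _ (by rw [hgd]; exact mod_modeq _)
    have h2 := Int.ModEq.add_left ((d.items.map (fun p => p.2 * f p.1)).sum - v * f k) h1
    have e : (d.items.map (fun p => p.2 * f p.1)).sum - v * f k + (v + w) * f k
        = (d.items.map (fun p => p.2 * f p.1)).sum + w * f k := by ring
    rwa [e] at h2
  · have hcf : d.contains k = false := by simpa using hc
    rw [PySem.Dict.items_insert_of_not_contains d _ hcf]
    simp only [List.map_append, List.sum_append, List.map_cons, List.map_nil,
      List.sum_cons, List.sum_nil, add_zero]
    refine Int.ModEq.add_left _ ?_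
    rw [PySem.Dict.getD_of_not_contains d 0 hcf, zero_add]
    exact Int.ModEq.mul_right _ (mod_modeq _)

lemma putB_ok (d : PySem.Dict (Int × Int × Int) Int) (rem odd carry w : Int)
    (h : DictOK d) : DictOK (putB d rem odd carry w).1 := by
  unfold putB
  split_ifs with h1 h2 h3
  · exact h
  · exact h
  · exact h
  · show DictOK (d.insert (rem, odd, carry) (PySem.Int.mod (d.getD (rem, odd, carry) 0 + w) pyMOD))
    constructor
    · exact PySem.Dict.nodup_keys_insert _ _ _ h.1
    · intro p hp
      rcases (PySem.Dict.mem_items_insert _ _ _ _).mp hp with rfl | ⟨hpd, _⟩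
      · refine ⟨?_, ?_, ?_⟩
        · show (0 : Int) < rem; omega
        · show (0 : Int) ≤ odd; omega
        · show odd ≤ rem + (PySem.Int.bitCount carry : Int); omega
      · exact h.2 p hpd

lemma putB_spec (d : PySem.Dict (Int × Int × Int) Int) (rem odd carry w : Int)
    (s : List Int) (h : DictOK d) :
    (putB d rem odd carry w).2 + SD (putB d rem odd carry w).1 s
      ≡ SD d s + w * dfsA rem odd s carry [ZMOD pyMOD] := by
  unfold putB
  split_ifs with h1 h2 h3
  · rw [dfsA_neg s h1]
    show (0 : Int) + SD d s ≡ SD d s + w * 0 [ZMOD pyMOD]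
    rw [show SD d s + w * 0 = 0 + SD d s from by ring]
  · subst h2
    rw [dfsA_zero, if_pos h3]
    show w + SD d s ≡ SD d s + w * 1 [ZMOD pyMOD]
    rw [show SD d s + w * 1 = w + SD d s from by ring]
  · subst h2
    rw [dfsA_zero, if_neg h3]
    show (0 : Int) + SD d s ≡ SD d s + w * 0 [ZMOD pyMOD]
    rw [show SD d s + w * 0 = 0 + SD d s from by ring]
  · have h4 := SD_insert d h.1 (rem, odd, carry) w s
    show (0 : Int) + SD (d.insert (rem, odd, carry) (PySem.Int.mod (d.getD (rem, odd, carry) 0 + w) pyMOD)) s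
      ≡ SD d s + w * dfsA rem odd s carry [ZMOD pyMOD]
    rw [zero_add]
    exact h4

lemma empty_ok : DictOK (PySem.Dict.empty : PySem.Dict (Int × Int × Int) Int) :=
  ⟨PySem.Dict.nodup_keys_empty, fun p hp => absurd hp (by intro hx; cases hx)⟩

lemma SD_empty (s : List Int) : SD (PySem.Dict.empty : PySem.Dict (Int × Int × Int) Int) s = 0 := rfl

lemma inner_loop (x rem odd carry cnt : Int) (rest : List Int) :
    ∀ (L : List Int) (st : PySem.Dict (Int × Int × Int) Int × Int), DictOK st.1 →
      DictOK ((L.foldl (innerStep x rem odd carry cnt) st).1) ∧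
      (L.foldl (innerStep x rem odd carry cnt) st).2
          + SD ((L.foldl (innerStep x rem odd carry cnt) st).1) rest
        ≡ st.2 + SD st.1 rest
          + (L.map (fun t =>
              PySem.Int.mod (PySem.Int.mod (cnt * (Nat.choose rem.toNat t.toNat : Int)) pyMOD * PySem.Int.powMod x t.toNat pyMOD) pyMOD
                * dfsA (rem - t) (odd - PySem.Int.mod (carry + t) 2) rest (PySem.Int.floordiv (carry + t) 2))).sum [ZMOD pyMOD] := by
  intro L
  induction L with
  | nil =>
    intro st h
    exact ⟨h, by simp⟩
  | cons t L ih =>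
    intro st hok
    simp only [List.foldl_cons, List.map_cons, List.sum_cons]
    set w : Int := PySem.Int.mod (PySem.Int.mod (cnt * (Nat.choose rem.toNat t.toNat : Int)) pyMOD * PySem.Int.powMod x t.toNat pyMOD) pyMOD with hw
    set r := putB st.1 (rem - t) (odd - PySem.Int.mod (carry + t) 2) (PySem.Int.floordiv (carry + t) 2) w with hr
    have hst1 : (innerStep x rem odd carry cnt st t) = (r.1, PySem.Int.mod (st.2 + r.2) pyMOD) := rfl
    have hok' : DictOK (innerStep x rem odd carry cnt st t).1 := by
      rw [hst1]
      show DictOK r.1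
      rw [hr]
      exact putB_ok st.1 (rem - t) (odd - PySem.Int.mod (carry + t) 2) (PySem.Int.floordiv (carry + t) 2) w hok
    obtain ⟨ihok, ihmod⟩ := ih (innerStep x rem odd carry cnt st t) hok'
    refine ⟨ihok, ?_⟩
    have hput := putB_spec st.1 (rem - t) (odd - PySem.Int.mod (carry + t) 2) (PySem.Int.floordiv (carry + t) 2) w rest hok
    rw [← hr] at hput
    have hstep : (innerStep x rem odd carry cnt st t).2 + SD (innerStep x rem odd carry cnt st t).1 rest
        ≡ st.2 + SD st.1 rest + w * dfsA (rem - t) (odd - PySem.Int.mod (carry + t) 2) rest (PySem.Int.floordiv (carry + t) 2) [ZMOD pyMOD] := by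
      rw [hst1]
      have h1 : PySem.Int.mod (st.2 + r.2) pyMOD + SD r.1 rest ≡ (st.2 + r.2) + SD r.1 rest [ZMOD pyMOD] :=
        Int.ModEq.add_right _ (mod_modeq _)
      refine h1.trans ?_
      have h2 := Int.ModEq.add_left st.2 hput
      rw [show st.2 + r.2 + SD r.1 rest = st.2 + (r.2 + SD r.1 rest) from by ring]
      rw [show st.2 + SD st.1 rest + w * dfsA (rem - t) (odd - PySem.Int.mod (carry + t) 2) rest (PySem.Int.floordiv (carry + t) 2)
            = st.2 + (SD st.1 rest + w * dfsA (rem - t) (odd - PySem.Int.mod (carry + t) 2) rest (PySem.Int.floordiv (carry + t) 2)) from by ring]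
      exact h2
    rw [← add_assoc]
    exact ihmod.trans (Int.ModEq.add_right _ hstep)

lemma entry_expand (x : Int) (rest : List Int) (rem odd carry cnt : Int)
    (hv : Viable (rem, odd, carry)) :
    ((PySem.List.pyRange 0 (rem + 1)).map (fun t =>
        PySem.Int.mod (PySem.Int.mod (cnt * (Nat.choose rem.toNat t.toNat : Int)) pyMOD * PySem.Int.powMod x t.toNat pyMOD) pyMOD
          * dfsA (rem - t) (odd - PySem.Int.mod (carry + t) 2) rest (PySem.Int.floordiv (carry + t) 2))).sum
      ≡ cnt * dfsA rem odd (x :: rest) carry [ZMOD pyMOD] := by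
  obtain ⟨hv1, hv2, hv3⟩ := hv
  have hv1' : (0 : Int) < rem := hv1
  have hv2' : (0 : Int) ≤ odd := hv2
  have hv3' : odd ≤ rem + (PySem.Int.bitCount carry : Int) := hv3
  have hcond : ¬ (rem < 0 ∨ odd < 0 ∨ rem + (PySem.Int.bitCount carry : Int) < odd) := by omega
  have hne : rem ≠ 0 := by omega
  have hEq := dfsA_cons (r := rem) (o := odd) (c := carry) (x := x) rest hcond hne
  have h1 := foldl_mod_modeq _
      (fun t => PySem.Int.mod ((Nat.choose rem.toNat t.toNat : Int) * PySem.Int.powMod x t.toNat pyMOD) pyMOD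
        * dfsA (rem - t) (odd - PySem.Int.mod (carry + t) 2) rest (PySem.Int.floordiv (carry + t) 2))
      (fun a t => rfl) (PySem.List.pyRange 0 (rem + 1)) 0
  rw [← hEq] at h1
  have h2 : cnt * dfsA rem odd (x :: rest) carry
      ≡ cnt * (0 + ((PySem.List.pyRange 0 (rem + 1)).map
          (fun t => PySem.Int.mod ((Nat.choose rem.toNat t.toNat : Int) * PySem.Int.powMod x t.toNat pyMOD) pyMOD
            * dfsA (rem - t) (odd - PySem.Int.mod (carry + t) 2) rest (PySem.Int.floordiv (carry + t) 2))).sum) [ZMOD pyMOD] :=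
    Int.ModEq.mul_left _ h1
  rw [zero_add, ← List.sum_map_mul_left] at h2
  refine (sum_modeq _ _ _ ?_).trans h2.symm
  intro t _
  set comb : Int := (Nat.choose rem.toNat t.toNat : Int) with hcomb
  set pw : Int := PySem.Int.powMod x t.toNat pyMOD with hpw
  set df : Int := dfsA (rem - t) (odd - PySem.Int.mod (carry + t) 2) rest (PySem.Int.floordiv (carry + t) 2) with hdf
  have ha : PySem.Int.mod (PySem.Int.mod (cnt * comb) pyMOD * pw) pyMOD * df
      ≡ cnt * comb * pw * df [ZMOD pyMOD] := by
    refine Int.ModEq.mul_right df ?_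
    refine (mod_modeq _).trans ?_
    exact Int.ModEq.mul_right pw (mod_modeq _)
  have hb : cnt * (PySem.Int.mod (comb * pw) pyMOD * df) ≡ cnt * comb * pw * df [ZMOD pyMOD] := by
    have h5 := Int.ModEq.mul_left cnt (Int.ModEq.mul_right df (mod_modeq (comb * pw)))
    rw [show cnt * (comb * pw * df) = cnt * comb * pw * df from by ring] at h5
    exact h5
  exact ha.trans hb.symm

lemma mid_loop (x : Int) (rest : List Int) :
    ∀ (E : List ((Int × Int × Int) × Int)) (st : PySem.Dict (Int × Int × Int) Int × Int),
      DictOK st.1 → (∀ p ∈ E, Viable p.1) →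
      DictOK ((E.foldl (midStep x) st).1) ∧
      (E.foldl (midStep x) st).2 + SD ((E.foldl (midStep x) st).1) rest
        ≡ st.2 + SD st.1 rest
          + (E.map (fun p => p.2 * dfsA p.1.1 p.1.2.1 (x :: rest) p.1.2.2)).sum [ZMOD pyMOD] := by
  intro E
  induction E with
  | nil =>
    intro st h _
    exact ⟨h, by simp⟩
  | cons kv E ih =>
    intro st hok hE
    simp only [List.foldl_cons, List.map_cons, List.sum_cons]
    obtain ⟨ok1, hmod1⟩ := inner_loop x kv.1.1 kv.1.2.1 kv.1.2.2 kv.2 rest (PySem.List.pyRange 0 (kv.1.1 + 1)) st hok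
    have hexp := entry_expand x rest kv.1.1 kv.1.2.1 kv.1.2.2 kv.2 (hE kv List.mem_cons_self)
    have hstep : (midStep x st kv).2 + SD ((midStep x st kv).1) rest
        ≡ st.2 + SD st.1 rest + kv.2 * dfsA kv.1.1 kv.1.2.1 (x :: rest) kv.1.2.2 [ZMOD pyMOD] :=
      hmod1.trans (Int.ModEq.add_left _ hexp)
    obtain ⟨ihok, ihmod⟩ := ih (midStep x st kv) ok1 (fun p hp => hE p (List.mem_cons_of_mem _ hp))
    refine ⟨ihok, ?_⟩
    rw [← add_assoc]
    exact ihmod.trans (Int.ModEq.add_right _ hstep)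

lemma SD_nil (d : PySem.Dict (Int × Int × Int) Int) (h : DictOK d) : SD d [] = 0 := by
  unfold SD
  apply List.sum_eq_zero
  intro y hy
  obtain ⟨p, hp, rfl⟩ := List.mem_map.mp hy
  obtain ⟨hv1, hv2, hv3⟩ := h.2 p hp
  rw [dfsA_nil (by omega) (by omega), mul_zero]

lemma outer_loop : ∀ (nums : List Int) (st : PySem.Dict (Int × Int × Int) Int × Int),
    DictOK st.1 →
    DictOK ((nums.foldl outerStep st).1) ∧
    (nums.foldl outerStep st).2 + SD ((nums.foldl outerStep st).1) []
      ≡ st.2 + SD st.1 nums [ZMOD pyMOD] := by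
  intro nums
  induction nums with
  | nil => intro st h; exact ⟨h, Int.ModEq.refl _⟩
  | cons x rest ih =>
    intro st hok
    simp only [List.foldl_cons]
    obtain ⟨ok1, hmod1⟩ := mid_loop x rest st.1.items (PySem.Dict.empty, st.2) empty_ok hok.2
    have hstep : (outerStep st x).2 + SD ((outerStep st x).1) rest
        ≡ st.2 + SD st.1 (x :: rest) [ZMOD pyMOD] := by
      unfold outerStep
      refine hmod1.trans ?_
      show st.2 + SD PySem.Dict.empty rest
          + (st.1.items.map (fun p => p.2 * dfsA p.1.1 p.1.2.1 (x :: rest) p.1.2.2)).sum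
        ≡ st.2 + SD st.1 (x :: rest) [ZMOD pyMOD]
      rw [SD_empty, add_zero]
      unfold SD
      exact Int.ModEq.refl _
    obtain ⟨ihok, ihmod⟩ := ih (outerStep st x) ok1
    exact ⟨ihok, ihmod.trans hstep⟩

lemma mod_one_eq_one : PySem.Int.mod (0 + 1) pyMOD = 1 := by
  rw [PySem.Int.mod_eq_emod_of_pos pyMOD_pos]
  norm_num [pyMOD]

lemma seed_eq (tc tg : Int) (nums : List Int) :
    dfsA tc tg nums 0 = (putB PySem.Dict.empty tc tg 0 1).2 + SD (putB PySem.Dict.empty tc tg 0 1).1 nums := by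
  unfold putB
  split_ifs with h1 h2 h3
  · rw [dfsA_neg nums h1]
    show (0 : Int) = 0 + SD (PySem.Dict.empty : PySem.Dict (Int × Int × Int) Int) nums
    rw [SD_empty]
    norm_num
  · subst h2
    rw [dfsA_zero, if_pos h3]
    show (1 : Int) = 1 + SD (PySem.Dict.empty : PySem.Dict (Int × Int × Int) Int) nums
    rw [SD_empty]
    norm_num
  · subst h2
    rw [dfsA_zero, if_neg h3]
    show (0 : Int) = 0 + SD (PySem.Dict.empty : PySem.Dict (Int × Int × Int) Int) nums
    rw [SD_empty]
    norm_num
  · show dfsA tc tg nums 0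
      = 0 + SD (PySem.Dict.empty.insert (tc, tg, 0) (PySem.Int.mod (PySem.Dict.empty.getD (tc, tg, 0) 0 + 1) pyMOD)) nums
    rw [PySem.Dict.getD_empty, mod_one_eq_one]
    unfold SD
    rw [PySem.Dict.items_insert_of_not_contains _ _ (PySem.Dict.contains_empty _)]
    rw [show (PySem.Dict.empty : PySem.Dict (Int × Int × Int) Int).items = [] from rfl]
    simp

-- ===== VERDICT (by name: the statement is the Claim_ definition above) =====
theorem magicalSum_spec : Claim_equal_magicalSum := by
  intro tc tg nums _
  unfold Spec_magicalSum
  show dfsA tc tg nums 0 = PySem.Int.mod ((nums.foldl outerStep (putB PySem.Dict.empty tc tg 0 1)).2) pyMOD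
  have hinit : DictOK (putB PySem.Dict.empty tc tg 0 1).1 := putB_ok _ _ _ _ _ empty_ok
  obtain ⟨hfok, hmod⟩ := outer_loop nums (putB PySem.Dict.empty tc tg 0 1) hinit
  rw [SD_nil _ hfok, add_zero] at hmod
  rw [← seed_eq tc tg nums] at hmod
  have hb := dfsA_bounds tc tg nums 0
  rw [PySem.Int.mod_eq_emod_of_pos pyMOD_pos]
  calc dfsA tc tg nums 0 = dfsA tc tg nums 0 % pyMOD := (Int.emod_eq_of_lt hb.1 hb.2).symm
    _ = (nums.foldl outerStep (putB PySem.Dict.empty tc tg 0 1)).2 % pyMOD := hmod.symm
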